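-- pv_equiv track=rewrite | github.com/seojinsarejj/TIL | coding-test/test/hash/위장.py | solution
-- ===== SOURCE A (Python) =====
-- import itertools
-- import itertools
--
-- def solution(clothes):
--
--     clothes = [count for cloth,count in clothes]
--     count = len(clothes)
--
--     for i in range(2,len(clothes)+1):
--         comb = list(itertools.combinations(clothes,i))
--         for j in range(len(comb)):
--             if i == len(set(comb[j])) :
--                 count += 1
--
--     return count
-- ===== SOURCE B (Python) =====
-- def solution(clothes):
--     counts = {}
--     for _, category in clothes:
--         counts[category] = counts.get(category, 0) + 1
--     result = 1
--     for c in counts.values():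
--         result *= c + 1
--     return result - 1
-- ===== Notes on version B (the rewrite author's own statement) =====
-- stated objective: faster
-- what changed: Replaced the exponential enumeration of all combinations of categories (checking each for distinctness) by a single counting pass per category and the closed-form product of (count_i + 1) minus 1.
import Mathlib
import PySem

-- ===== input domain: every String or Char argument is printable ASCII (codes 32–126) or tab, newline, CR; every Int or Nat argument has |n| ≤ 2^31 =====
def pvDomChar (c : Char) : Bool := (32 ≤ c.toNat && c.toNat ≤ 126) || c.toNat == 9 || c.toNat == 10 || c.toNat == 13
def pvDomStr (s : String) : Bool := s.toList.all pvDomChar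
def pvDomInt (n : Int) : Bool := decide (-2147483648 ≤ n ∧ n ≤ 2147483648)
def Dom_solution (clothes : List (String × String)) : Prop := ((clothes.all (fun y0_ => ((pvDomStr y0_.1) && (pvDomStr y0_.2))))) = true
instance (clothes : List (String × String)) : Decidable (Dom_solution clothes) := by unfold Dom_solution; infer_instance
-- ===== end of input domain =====

-- B replaces A's exponential enumeration of all combinations by a counting pass and the product of (count+1) per category, minus 1 (faster, asymptotic).


-- ===== PORT A =====
-- itertools.combinations is PySem.List.combinations; i comes from range(2, n+1) so i ≥ 2 and i.toNat is exact
def solution (clothes : List (String × String)) : Int :=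
  let clothes2 := clothes.map (fun p => p.2)
  let count : Int := (clothes2.length : Int)
  (PySem.List.pyRange 2 ((clothes2.length : Int) + 1) 1).foldl (fun count i =>
    let comb := PySem.List.combinations clothes2 i.toNat
    (PySem.List.pyRange 0 ((comb.length : Int)) 1).foldl (fun count j =>
      if i = ((PySem.Set.ofList (PySem.List.pyGetD comb j [])).length : Int) then count + 1
      else count) count) count

-- ===== PORT B =====
def solution_alt (clothes : List (String × String)) : Int :=
  let counts := clothes.foldl (fun d p => d.insert p.2 (d.getD p.2 0 + 1))
      (PySem.Dict.empty : PySem.Dict String Int)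
  let result := counts.values.foldl (fun r c => r * (c + 1)) (1 : Int)
  result - 1

-- ===== PRECONDITION & SPEC =====
def Spec_solution (clothes : List (String × String)) (out : Int) : Prop := out = solution_alt clothes
instance (clothes : List (String × String)) (out : Int) : Decidable (Spec_solution clothes out) := by unfold Spec_solution; infer_instance

-- ===== CLAIM (what is proved, stated in full; the proofs are below) =====
def Claim_equal_solution : Prop := ∀ (clothes : List (String × String)), Dom_solution clothes → Spec_solution clothes (solution clothes)

-- ===== LEMMAS AND PROOFS =====

-- number of size-r combinations of l whose entries are pairwise distinct and avoid the forbidden list S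
def Fcnt (S l : List String) (r : Nat) : Nat :=
  (PySem.List.combinations l r).countP (fun t => decide (t.Nodup ∧ ∀ a ∈ t, a ∉ S))

-- the same, summed over all sizes 0..l.length
def Tcnt (S l : List String) : Nat :=
  ((List.range (l.length + 1)).map (Fcnt S l)).sum

-- recursive characterisation: skip a forbidden head, otherwise take-or-leave it
def Pcnt (S l : List String) : Nat :=
  match l with
  | [] => 1
  | x :: xs => if x ∈ S then Pcnt S xs else Pcnt S xs + Pcnt (x :: S) xs

lemma ofList_sublist (l : List String) : (PySem.Set.ofList l).Sublist l := by
  induction l with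
  | nil => simp [PySem.Set.ofList]
  | cons x xs ih =>
    rw [PySem.Set.ofList_cons]
    simp only [PySem.Set.discard]
    exact List.Sublist.cons₂ x (List.Sublist.trans List.filter_sublist ih)

lemma len_ofList_eq_iff (t : List String) :
    (PySem.Set.ofList t).length = t.length ↔ t.Nodup := by
  constructor
  · intro h
    have := (ofList_sublist t).eq_of_length h
    rw [← this]; exact PySem.Set.nodup_ofList t
  · intro h; rw [PySem.Set.ofList_eq_self_of_nodup t h]

lemma inner_eq (comb : List (List String)) (i c : Int) :
    (PySem.List.pyRange 0 ((comb.length : Int)) 1).foldl (fun count j =>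
      if i = ((PySem.Set.ofList (PySem.List.pyGetD comb j [])).length : Int) then count + 1
      else count) c
    = c + (comb.countP (fun t => decide (i = ((PySem.Set.ofList t).length : Int))) : Int) := by
  rw [PySem.List.foldl_pyRange_zero_pyGetD' comb []
    (fun count t => if i = ((PySem.Set.ofList t).length : Int) then count + 1 else count) c]
  exact PySem.List.foldl_ite_add_one _ comb c

lemma countP_eq_F (l : List String) (k : Nat) :
    (PySem.List.combinations l (2 + k)).countP
      (fun t => decide (((2 + k : Nat) : Int) = ((PySem.Set.ofList t).length : Int)))
    = Fcnt [] l (2 + k) := by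
  unfold Fcnt
  apply List.countP_congr
  intro t ht
  have hlen : t.length = 2 + k := PySem.List.length_of_mem_combinations ht
  have hle : (PySem.Set.ofList t).length ≤ t.length := (ofList_sublist t).length_le
  simp only [decide_eq_true_eq, List.not_mem_nil, not_false_iff, implies_true, and_true]
  rw [← len_ofList_eq_iff]
  omega

lemma F_zero (S l : List String) : Fcnt S l 0 = 1 := by
  simp [Fcnt, PySem.List.combinations_zero]

lemma F_one (l : List String) : Fcnt [] l 1 = l.length := by
  unfold Fcnt
  rw [PySem.List.combinations_one, List.countP_map]
  have h : ((fun t => decide (t.Nodup ∧ ∀ a ∈ t, a ∉ ([] : List String))) ∘ fun x => [x])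
      = fun _ => true := by
    funext x; simp
  rw [h, List.countP_true]

lemma F_gt (S l : List String) {r : Nat} (h : l.length < r) : Fcnt S l r = 0 := by
  simp [Fcnt, PySem.List.combinations_eq_nil_of_length_lt l h]

lemma F_succ_cons_mem (S l : List String) (x : String) (r : Nat) (hx : x ∈ S) :
    Fcnt S (x :: l) (r + 1) = Fcnt S l (r + 1) := by
  unfold Fcnt
  rw [PySem.List.combinations_cons_succ, List.countP_append, List.countP_map]
  have h0 : List.countP ((fun t => decide (t.Nodup ∧ ∀ a ∈ t, a ∉ S)) ∘ fun c => x :: c)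
      (PySem.List.combinations l r) = 0 := by
    apply List.countP_eq_zero.mpr
    intro u _
    simp only [Function.comp_apply, decide_eq_true_eq, not_and]
    intro _ hall
    exact absurd hx (hall x List.mem_cons_self)
  omega

lemma F_succ_cons_not_mem (S l : List String) (x : String) (r : Nat) (hx : x ∉ S) :
    Fcnt S (x :: l) (r + 1) = Fcnt (x :: S) l r + Fcnt S l (r + 1) := by
  unfold Fcnt
  rw [PySem.List.combinations_cons_succ, List.countP_append, List.countP_map]
  congr 1
  apply List.countP_congr
  intro u _
  simp only [Function.comp_apply, decide_eq_true_eq, List.nodup_cons, List.forall_mem_cons]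
  constructor
  · rintro ⟨⟨hxu, hnd⟩, hxS, hall⟩
    refine ⟨hnd, fun a ha => ?_⟩
    simp only [List.mem_cons, not_or]
    exact ⟨fun h => hxu (h ▸ ha), hall a ha⟩
  · rintro ⟨hnd, hall⟩
    refine ⟨⟨fun h => (hall x h) List.mem_cons_self, hnd⟩, hx, fun a ha => ?_⟩
    have := hall a ha
    simp only [List.mem_cons, not_or] at this
    exact this.2

lemma sum_map_add_nat {α : Type} (l : List α) (f g : α → Nat) :
    (l.map (fun x => f x + g x)).sum = (l.map f).sum + (l.map g).sum := by
  induction l with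
  | nil => simp
  | cons x xs ih => simp [ih]; omega

lemma Tcnt_shift (S l : List String) :
    ((List.range (l.length + 1)).map (fun r => Fcnt S l (r + 1))).sum + 1 = Tcnt S l := by
  have h1 : ((List.range (l.length + 2)).map (Fcnt S l)).sum
      = 1 + ((List.range (l.length + 1)).map (fun r => Fcnt S l (r + 1))).sum := by
    rw [List.range_succ_eq_map]
    simp [List.map_map, Function.comp_def, F_zero, Nat.succ_eq_add_one]
  have h2 : ((List.range (l.length + 2)).map (Fcnt S l)).sum
      = Tcnt S l + Fcnt S l (l.length + 1) := by
    rw [show l.length + 2 = (l.length + 1) + 1 from rfl, List.range_succ]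
    simp [Tcnt]
  have h3 : Fcnt S l (l.length + 1) = 0 := F_gt S l (by omega)
  omega

lemma T_cons (S l : List String) (x : String) :
    Tcnt S (x :: l) = (if x ∈ S then 0 else Tcnt (x :: S) l) + Tcnt S l := by
  have hstart : Tcnt S (x :: l) =
      ((List.range (l.length + 1)).map (fun r => Fcnt S (x :: l) (r + 1))).sum + 1 := by
    unfold Tcnt
    rw [show (x :: l).length + 1 = (l.length + 1) + 1 from rfl, List.range_succ_eq_map]
    simp only [List.map_cons, List.sum_cons, F_zero, List.map_map, Function.comp_def,
      Nat.succ_eq_add_one]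
    omega
  by_cases hx : x ∈ S
  · rw [hstart, if_pos hx]
    rw [List.map_congr_left (fun r _ => F_succ_cons_mem S l x r hx), Tcnt_shift]
    omega
  · rw [hstart, if_neg hx]
    have hc : ((List.range (l.length + 1)).map (fun r => Fcnt S (x :: l) (r + 1))).sum
        = ((List.range (l.length + 1)).map (fun r => Fcnt (x :: S) l r)).sum
          + ((List.range (l.length + 1)).map (fun r => Fcnt S l (r + 1))).sum := by
      rw [← sum_map_add_nat]
      exact congrArg List.sum
        (List.map_congr_left (fun r _ => F_succ_cons_not_mem S l x r hx))
    have h1 : ((List.range (l.length + 1)).map (fun r => Fcnt (x :: S) l r)).sum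
        = Tcnt (x :: S) l := rfl
    have h2 := Tcnt_shift S l
    omega

lemma Tcnt_eq_Pcnt (l S : List String) : Tcnt S l = Pcnt S l := by
  induction l generalizing S with
  | nil => simp [Tcnt, Pcnt, F_zero]
  | cons x xs ih =>
    rw [T_cons, ih, ih]
    by_cases hx : x ∈ S
    · simp [Pcnt, hx]
    · simp [Pcnt, hx]
      omega

lemma Pcnt_eq_prod (l : List String) : ∀ (S : List String),
    Pcnt S l = ((PySem.Set.ofList l).map (fun c => if c ∈ S then 1 else l.count c + 1)).prod := by
  induction l with
  | nil => intro S; simp [Pcnt, PySem.Set.ofList]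
  | cons x xs ih =>
    intro S
    rw [PySem.Set.ofList_cons]
    simp only [List.map_cons, List.prod_cons]
    have hnd : (PySem.Set.ofList xs).Nodup := PySem.Set.nodup_ofList xs
    set L := PySem.Set.ofList xs with hL
    have hdiscA : ((L.discard x).map (fun c => if c ∈ S then 1 else (x :: xs).count c + 1)).prod
        = ((L.discard x).map (fun c => if c ∈ S then 1 else xs.count c + 1)).prod := by
      refine congrArg List.prod (List.map_congr_left fun c hc => ?_)
      have hne : ¬ (x = c) := fun h => ((PySem.Set.mem_discard L x c).mp hc).2 h.symm
      simp [hne]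
    have hdiscB : ((L.discard x).map (fun c => if c ∈ x :: S then 1 else xs.count c + 1)).prod
        = ((L.discard x).map (fun c => if c ∈ S then 1 else xs.count c + 1)).prod := by
      refine congrArg List.prod (List.map_congr_left fun c hc => ?_)
      have hne : c ≠ x := ((PySem.Set.mem_discard L x c).mp hc).2
      simp [List.mem_cons, hne]
    have hextract : ∀ (g : String → Nat), x ∈ xs →
        (L.map g).prod = g x * ((L.discard x).map g).prod := by
      intro g hmem
      have hxL : x ∈ L := (PySem.Set.mem_ofList xs x).mpr hmem
      have herase : L.erase x = L.discard x := by
        rw [List.Nodup.erase_eq_filter hnd]; rfl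
      rw [((List.perm_cons_erase hxL).map g).prod_eq, List.map_cons, List.prod_cons, herase]
    rw [hdiscA]
    by_cases hmem : x ∈ xs
    · by_cases hx : x ∈ S
      · rw [show Pcnt S (x :: xs) = Pcnt S xs from by simp [Pcnt, hx], ih S,
          hextract _ hmem, if_pos hx, if_pos hx, one_mul]
      · rw [show Pcnt S (x :: xs) = Pcnt S xs + Pcnt (x :: S) xs from by simp [Pcnt, hx],
          ih S, ih (x :: S), hextract _ hmem, hextract _ hmem,
          if_pos (List.mem_cons_self), if_neg hx, if_neg hx, one_mul, hdiscB,
          List.count_cons_self]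
        ring
    · have hD : L.discard x = L := by
        apply List.filter_eq_self.mpr
        intro a ha
        simp only [Bool.not_eq_true', beq_eq_false_iff_ne, ne_eq]
        intro h
        exact hmem ((PySem.Set.mem_ofList xs x).mp (h ▸ ha))
      have hcnt0 : xs.count x = 0 := List.count_eq_zero.mpr hmem
      rw [hD] at hdiscB ⊢
      by_cases hx : x ∈ S
      · rw [show Pcnt S (x :: xs) = Pcnt S xs from by simp [Pcnt, hx], ih S, if_pos hx, one_mul]
      · rw [show Pcnt S (x :: xs) = Pcnt S xs + Pcnt (x :: S) xs from by simp [Pcnt, hx],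
          ih S, ih (x :: S), hdiscB, if_neg hx, List.count_cons_self, hcnt0]
        ring

lemma Tcnt_split (l : List String) :
    Tcnt [] l = 1 + l.length + ((List.range (l.length - 1)).map (fun k => Fcnt [] l (2 + k))).sum := by
  cases l with
  | nil => simp [Tcnt, F_zero]
  | cons x xs =>
    unfold Tcnt
    rw [show (x :: xs).length + 1 = 2 + ((x :: xs).length - 1) by simp; omega, List.range_add]
    simp only [List.map_append, List.sum_append, List.map_map, Function.comp_def]
    rw [show List.range 2 = [0, 1] from rfl]
    simp [F_zero, F_one]

lemma solution_eq (clothes : List (String × String)) :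
    solution clothes = (Tcnt [] (clothes.map (fun p => p.2)) : Int) - 1 := by
  set l := clothes.map (fun p => p.2) with hl
  show (PySem.List.pyRange 2 ((l.length : Int) + 1) 1).foldl (fun count i =>
      (PySem.List.pyRange 0 (((PySem.List.combinations l i.toNat).length : Int)) 1).foldl
        (fun count j => if i = ((PySem.Set.ofList
            (PySem.List.pyGetD (PySem.List.combinations l i.toNat) j [])).length : Int)
          then count + 1 else count) count) (l.length : Int)
    = (Tcnt [] l : Int) - 1
  have hbody : (fun (count : Int) (i : Int) =>
      (PySem.List.pyRange 0 (((PySem.List.combinations l i.toNat).length : Int)) 1).foldl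
        (fun count j => if i = ((PySem.Set.ofList
            (PySem.List.pyGetD (PySem.List.combinations l i.toNat) j [])).length : Int)
          then count + 1 else count) count)
      = (fun (count : Int) (i : Int) => count +
        ((PySem.List.combinations l i.toNat).countP
          (fun t => decide (i = ((PySem.Set.ofList t).length : Int))) : Int)) := by
    funext c i
    exact inner_eq (PySem.List.combinations l i.toNat) i c
  rw [hbody, PySem.List.foldl_add, PySem.List.pyRange_one]
  rw [show ((l.length : Int) + 1 - 2).toNat = l.length - 1 by omega]
  rw [List.map_map]
  have hmap : ∀ k ∈ List.range (l.length - 1),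
      ((fun i : Int => ((PySem.List.combinations l i.toNat).countP
          (fun t => decide (i = ((PySem.Set.ofList t).length : Int))) : Int)) ∘ fun k : Nat => (2 : Int) + k) k
      = ((Fcnt [] l (2 + k) : Nat) : Int) := by
    intro k _
    simp only [Function.comp_def]
    rw [show ((2 : Int) + (k : Int)).toNat = 2 + k by omega]
    rw [show ((2 : Int) + (k : Int)) = ((2 + k : Nat) : Int) by push_cast; ring]
    rw [countP_eq_F]
  rw [List.map_congr_left hmap]
  have hsplit := Tcnt_split l
  rw [show (List.range (l.length - 1)).map (fun k => ((Fcnt [] l (2 + k) : Nat) : Int))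
      = ((List.range (l.length - 1)).map (fun k => Fcnt [] l (2 + k))).map Nat.cast by
    rw [List.map_map]; rfl]
  rw [← Nat.cast_list_sum]
  omega

lemma foldl_mul_succ (l : List Int) (a : Int) :
    l.foldl (fun r c => r * (c + 1)) a = a * (l.map (fun c => c + 1)).prod := by
  induction l generalizing a with
  | nil => simp
  | cons x xs ih => simp [ih, mul_assoc]

lemma solution_alt_eq (clothes : List (String × String)) :
    solution_alt clothes = (Pcnt [] (clothes.map (fun p => p.2)) : Int) - 1 := by
  set l := clothes.map (fun p => p.2) with hl
  show ((clothes.foldl (fun d p => d.insert p.2 (d.getD p.2 0 + 1))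
      (PySem.Dict.empty : PySem.Dict String Int)).values.foldl
        (fun r c => r * (c + 1)) (1 : Int)) - 1
    = (Pcnt [] l : Int) - 1
  have hc : clothes.foldl (fun d p => d.insert p.2 (d.getD p.2 0 + 1))
      (PySem.Dict.empty : PySem.Dict String Int) = PySem.Dict.counter l := by
    rw [← PySem.Dict.foldl_insert_getD_add_one_eq_counter l, hl, List.foldl_map]
  rw [hc]
  have hv : (PySem.Dict.counter l).values
      = (PySem.Set.ofList l).map (fun k => ((l.count k : Nat) : Int)) := by
    show (PySem.Dict.counter l).items.map (fun p => p.2)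
      = (PySem.Set.ofList l).map (fun k => ((l.count k : Nat) : Int))
    rw [PySem.Dict.items_counter, List.map_map]
    rfl
  rw [hv, foldl_mul_succ, one_mul, Pcnt_eq_prod]
  congr 1
  rw [List.map_map]
  rw [show ((PySem.Set.ofList l).map fun c =>
      if c ∈ ([] : List String) then 1 else l.count c + 1)
      = (PySem.Set.ofList l).map (fun c => l.count c + 1) by
    apply List.map_congr_left; intro c _; simp]
  rw [Nat.cast_list_prod, List.map_map]
  refine congrArg List.prod (List.map_congr_left fun c _ => ?_)
  simp [Function.comp]

-- ===== VERDICT (by name: the statement is the Claim_ definition above) =====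
theorem solution_spec : Claim_equal_solution := by
  intro clothes _
  unfold Spec_solution
  rw [solution_eq, solution_alt_eq, Tcnt_eq_Pcnt]
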